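-- pv_equiv track=rewrite | github.com/Nonac/CS_2019_UoB | Graph.py | conutEdgesInLocalWithoutFather
-- ===== SOURCE A (Python) =====
-- def conutEdgesInLocalWithoutFather(edges):
--     local = []
--     for i in range(len(edges) + 1):
--         cnt = 0
--         if i > 0:
--             for each in edges[i - 1]:
--                 if each == 1:
--                     cnt += 1
--         if i < (len(edges) + 1):
--             for group in edges:
--                 if len(group) > i:
--                     if group[i] == 1:
--                         cnt += 1
--         local.append(cnt)
--     return local
-- ===== SOURCE B (Python) =====
-- def conutEdgesInLocalWithoutFather(edges):
--     # One pass over the rows: per-row list of columns holding a 1 feeds both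
--     # the column counter and the row sums; a final combine pass builds the result.
--     col = {}
--     row_sums = []
--     for group in edges:
--         ones = [j for j, v in enumerate(group) if v == 1]
--         for j in ones:
--             col[j] = col.get(j, 0) + 1
--         row_sums.append(len(ones))
--     return [(row_sums[i - 1] if i > 0 else 0) + col.get(i, 0)
--             for i in range(len(edges) + 1)]
-- ===== Notes on version B (the rewrite author's own statement) =====
-- stated objective: faster
-- what changed: Replaces the n+1 nested column scans over all rows by a single pass that accumulates a column-count dict and per-row sums, followed by one combine pass.
import Mathlib
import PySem

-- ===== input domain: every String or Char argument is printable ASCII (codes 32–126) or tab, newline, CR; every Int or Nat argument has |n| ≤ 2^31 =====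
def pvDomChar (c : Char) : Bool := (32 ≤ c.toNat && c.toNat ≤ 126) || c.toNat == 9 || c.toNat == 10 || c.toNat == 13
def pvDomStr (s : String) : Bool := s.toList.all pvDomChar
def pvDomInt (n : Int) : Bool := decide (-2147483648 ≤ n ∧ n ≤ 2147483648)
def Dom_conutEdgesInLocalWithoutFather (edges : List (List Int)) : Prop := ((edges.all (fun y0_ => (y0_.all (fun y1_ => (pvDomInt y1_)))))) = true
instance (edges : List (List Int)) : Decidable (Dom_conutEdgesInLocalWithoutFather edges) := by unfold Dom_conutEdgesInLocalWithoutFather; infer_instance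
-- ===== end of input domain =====

-- B replaces A's per-index rescans of all rows by one accumulation pass (column-count dict + row sums) and a combine pass.

-- ===== PORT A =====
def conutEdgesInLocalWithoutFather (edges : List (List Int)) : List Int :=
  (PySem.List.pyRange 0 ((edges.length : Int) + 1) 1).foldl (fun localAcc i =>
    localAcc ++ [
      let cnt : Int := 0
      let cnt := if i > 0 then
          (PySem.List.pyGetD edges (i - 1) []).foldl
            (fun cnt each => if each = 1 then cnt + 1 else cnt) cnt
        else cnt
      let cnt := if i < (edges.length : Int) + 1 then
          edges.foldl (fun cnt group =>
            if (group.length : Int) > i then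
              (if PySem.List.pyGetD group i 0 = 1 then cnt + 1 else cnt)
            else cnt) cnt
        else cnt
      cnt]) []

-- ===== PORT B =====
def bOnes (group : List Int) : List Int :=
  ((PySem.List.enumerate group 0).filter (fun p => p.2 == 1)).map (·.1)

def bStep (st : PySem.Dict Int Int × List Int) (group : List Int) :
    PySem.Dict Int Int × List Int :=
  let ones := bOnes group
  let col := ones.foldl (fun d j => d.insert j (d.getD j 0 + 1)) st.1
  (col, st.2 ++ [(ones.length : Int)])

def conutEdgesInLocalWithoutFather_alt (edges : List (List Int)) : List Int :=
  let st := edges.foldl bStep (PySem.Dict.empty, [])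
  (PySem.List.pyRange 0 ((edges.length : Int) + 1) 1).map (fun i =>
    (if i > 0 then PySem.List.pyGetD st.2 (i - 1) 0 else 0) + st.1.getD i 0)

-- ===== PRECONDITION & SPEC =====
def Spec_conutEdgesInLocalWithoutFather (edges : List (List Int)) (out : List Int) : Prop := out = conutEdgesInLocalWithoutFather_alt edges
instance (edges : List (List Int)) (out : List Int) : Decidable (Spec_conutEdgesInLocalWithoutFather edges out) := by unfold Spec_conutEdgesInLocalWithoutFather; infer_instance

-- ===== CLAIM (what is proved, stated in full; the proofs are below) =====
def Claim_equal_conutEdgesInLocalWithoutFather : Prop := ∀ (edges : List (List Int)), Dom_conutEdgesInLocalWithoutFather edges → Spec_conutEdgesInLocalWithoutFather edges (conutEdgesInLocalWithoutFather edges)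

-- ===== LEMMAS AND PROOFS =====

-- per-row contribution to column k, as both sides compute it
def colContrib (k : Nat) (g : List Int) : Int :=
  if g[k]? = some 1 then 1 else 0

-- A's row-count loop is init + (count of ones)
theorem rowFold_eq (g : List Int) (c : Int) :
    g.foldl (fun cnt each => if each = 1 then cnt + 1 else cnt) c
      = c + (g.count 1 : Int) := by
  induction g generalizing c with
  | nil => simp
  | cons a t ih =>
    simp only [List.foldl_cons, List.count_cons, ih]
    by_cases h : a = 1
    · simp [h]; ring
    · simp [h]

-- A's column loop is init + sum of per-row contributions
theorem colFold_eq (edges : List (List Int)) (k : Nat) (c : Int) :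
    edges.foldl (fun cnt group =>
        if (group.length : Int) > (k : Int) then
          (if PySem.List.pyGetD group (k : Int) 0 = 1 then cnt + 1 else cnt)
        else cnt) c
      = c + (edges.map (colContrib k)).sum := by
  induction edges generalizing c with
  | nil => simp
  | cons g t ih =>
    simp only [List.foldl_cons, List.map_cons, List.sum_cons, ih]
    by_cases hl : k < g.length
    · have : PySem.List.pyGetD g (k : Int) 0 = g[k] := by
        simp [PySem.List.pyGetD_natCast, List.getD_eq_getElem?_getD, List.getElem?_eq_getElem hl]
      rw [if_pos (by exact_mod_cast hl)]
      by_cases hv : g[k] = 1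
      · simp [colContrib, this, hv, List.getElem?_eq_getElem hl]; ring
      · simp [colContrib, this, hv, List.getElem?_eq_getElem hl]
    · have hn : g[k]? = none := by
        rw [List.getElem?_eq_none_iff]; omega
      rw [if_neg (by exact_mod_cast hl)]
      simp [colContrib, hn]

-- indices in (enumerate g s) are ≥ s
theorem enumerate_fst_ge (g : List Int) (s : Int) :
    ∀ p ∈ PySem.List.enumerate g s, s ≤ p.1 := by
  intro p hp
  rcases (PySem.List.mem_enumerate_iff _ _ _).1 hp with ⟨k, hk, rfl⟩
  simp

-- count of x in a row's one-columns list
theorem bOnes_count (g : List Int) (s x : Int) (hs : s ≤ x) :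
    (((PySem.List.enumerate g s).filter (fun p => p.2 == 1)).map (·.1)).count x
      = if g[(x - s).toNat]? = some 1 then 1 else 0 := by
  induction g generalizing s with
  | nil => simp [PySem.List.enumerate_nil]
  | cons a t ih =>
    rw [PySem.List.enumerate_cons]
    by_cases hx : x = s
    · subst hx
      have hz : (x - x).toNat = 0 := by omega
      have hrest : (((PySem.List.enumerate t (x + 1)).filter (fun p => p.2 == 1)).map (·.1)).count x = 0 := by
        rw [List.count_eq_zero]
        intro hmem
        rcases List.mem_map.1 hmem with ⟨p, hp, hpe⟩
        have := enumerate_fst_ge t (x + 1) p (List.mem_filter.1 hp).1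
        omega
      by_cases hv : a = 1
      · simp [hv, hrest]
      · simp [hv, hrest]
    · have hs' : s + 1 ≤ x := by omega
      have hsub : (x - s).toNat = (x - (s + 1)).toNat + 1 := by omega
      have ht := ih (s + 1) hs'
      by_cases hv : a = 1
      · simp [hv, List.count_cons, ht, hsub]
        omega
      · simp [hv, ht, hsub]

-- length of a row's one-columns list is its count of ones
theorem enumerate_countP_snd (g : List Int) (s : Int) :
    (PySem.List.enumerate g s).countP (fun p => p.2 == 1) = g.countP (fun v => v == 1) := by
  induction g generalizing s with
  | nil => simp [PySem.List.enumerate_nil]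
  | cons a t ih => simp [PySem.List.enumerate_cons, List.countP_cons, ih]

theorem bOnes_length (g : List Int) :
    ((bOnes g).length : Int) = (g.count 1 : Int) := by
  unfold bOnes
  rw [List.length_map, ← List.countP_eq_length_filter, enumerate_countP_snd, List.count]

-- B's fold: second component is the list of per-row one-counts
theorem bFold_snd (edges : List (List Int)) (d : PySem.Dict Int Int) (rs : List Int) :
    (edges.foldl bStep (d, rs)).2 = rs ++ edges.map (fun g => ((bOnes g).length : Int)) := by
  induction edges generalizing d rs with
  | nil => simp
  | cons g t ih => simp [bStep, ih]

-- B's fold: dict lookup at x is init + total count of x among all rows' one-columns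
theorem bFold_getD (edges : List (List Int)) (d : PySem.Dict Int Int) (rs : List Int) (x : Int) :
    (edges.foldl bStep (d, rs)).1.getD x 0
      = d.getD x 0 + ((edges.map (fun g => ((bOnes g).count x : Int))).sum) := by
  induction edges generalizing d rs with
  | nil => simp
  | cons g t ih =>
    simp only [List.foldl_cons, List.map_cons, List.sum_cons]
    rw [bStep]
    simp only []
    rw [ih]
    rw [PySem.Dict.getD_foldl_insert_add_one]
    ring

-- ===== VERDICT (by name: the statement is the Claim_ definition above) =====
theorem conutEdgesInLocalWithoutFather_spec : Claim_equal_conutEdgesInLocalWithoutFather := by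
  intro edges _
  unfold Spec_conutEdgesInLocalWithoutFather
  unfold conutEdgesInLocalWithoutFather conutEdgesInLocalWithoutFather_alt
  rw [PySem.List.foldl_append_singleton_eq_map, List.nil_append]
  simp only [bFold_snd, bFold_getD, PySem.Dict.getD_empty, List.nil_append, zero_add]
  apply List.map_congr_left
  intro i hi
  obtain ⟨h0, hlt⟩ := PySem.List.mem_pyRange_one.1 hi
  obtain ⟨k, rfl⟩ : ∃ k : Nat, i = (k : Int) := ⟨i.toNat, (Int.toNat_of_nonneg h0).symm⟩
  have hk : k < edges.length + 1 := by exact_mod_cast hlt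
  simp only [if_pos hlt]
  rw [colFold_eq edges k]
  congr 1
  · -- row part
    by_cases hk0 : (0 : Int) < (k : Nat)
    · rw [if_pos hk0, if_pos hk0, rowFold_eq]
      have hk1 : 1 ≤ k := by exact_mod_cast hk0
      have hcast : ((k : Nat) : Int) - 1 = ((k - 1 : Nat) : Int) := by omega
      have hlen : k - 1 < edges.length := by omega
      rw [hcast, PySem.List.pyGetD_natCast, PySem.List.pyGetD_natCast,
        List.getD_eq_getElem?_getD, List.getD_eq_getElem?_getD,
        List.getElem?_eq_getElem hlen,
        List.getElem?_eq_getElem (by simpa using hlen)]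
      simp [bOnes_length]
    · rw [if_neg hk0, if_neg hk0]
  · -- column part
    apply congrArg List.sum
    apply List.map_congr_left
    intro g _
    have := bOnes_count g 0 (k : Nat) (by positivity)
    unfold bOnes at *
    rw [this]
    have hz : (((k : Nat) : Int) - 0).toNat = k := by omega
    rw [hz]
    unfold colContrib
    by_cases hv : g[k]? = some 1 <;> simp [hv]
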